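-- pv_equiv track=rewrite | github.com/magnusimports/evolveyou-unified | services/plans-service/src/adapters/taco_data_adapter.py | _determine_dietary_tags
-- ===== SOURCE A (Python) =====
-- from typing import List, Dict, Optional, Any
--
-- def _determine_dietary_tags(category: str, name: str) -> List[str]:
--     """
--     Determina tags dietéticas do alimento
--
--     Args:
--         category: Categoria do alimento
--         name: Nome do alimento
--
--     Returns:
--         List[str]: Lista de tags dietéticas
--     """
--     tags = []
--     name_lower = name.lower()
--
--     # Tags por categoria
--     if category == "proteinas":
--         if any(word in name_lower for word in ["carne", "boi", "porco", "frango", "peixe"]):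
--             tags.append("meat")
--
--     if category == "laticinios":
--         tags.extend(["dairy", "lactose"])
--
--     if category in ["frutas", "vegetais", "cereais", "leguminosas", "oleaginosas"]:
--         tags.append("vegetarian")
--         tags.append("vegan")
--
--     # Glúten (cereais específicos)
--     if category == "cereais":
--         if any(word in name_lower for word in ["trigo", "aveia", "cevada", "centeio"]):
--             tags.append("gluten")
--
--     return tags
-- ===== SOURCE B (Python) =====
-- _TAG_RULES = {
--     "proteinas": ([], [(["carne", "boi", "porco", "frango", "peixe"], "meat")]),
--     "laticinios": (["dairy", "lactose"], []),
--     "frutas": (["vegetarian", "vegan"], []),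
--     "vegetais": (["vegetarian", "vegan"], []),
--     "cereais": (["vegetarian", "vegan"],
--                 [(["trigo", "aveia", "cevada", "centeio"], "gluten")]),
--     "leguminosas": (["vegetarian", "vegan"], []),
--     "oleaginosas": (["vegetarian", "vegan"], []),
-- }
--
--
-- def _determine_dietary_tags(category, name):
--     base, rules = _TAG_RULES.get(category, ([], []))
--     name_lower = name.lower()
--     return list(base) + [tag for words, tag in rules
--                          if any(w in name_lower for w in words)]
-- ===== Notes on version B (the rewrite author's own statement) =====
-- stated objective: simpler
-- what changed: Replaces the chain of category if-statements with a single static rule table (category -> unconditional tags + keyword-conditional rules) driven by one lookup and one rule loop.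
import Mathlib
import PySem

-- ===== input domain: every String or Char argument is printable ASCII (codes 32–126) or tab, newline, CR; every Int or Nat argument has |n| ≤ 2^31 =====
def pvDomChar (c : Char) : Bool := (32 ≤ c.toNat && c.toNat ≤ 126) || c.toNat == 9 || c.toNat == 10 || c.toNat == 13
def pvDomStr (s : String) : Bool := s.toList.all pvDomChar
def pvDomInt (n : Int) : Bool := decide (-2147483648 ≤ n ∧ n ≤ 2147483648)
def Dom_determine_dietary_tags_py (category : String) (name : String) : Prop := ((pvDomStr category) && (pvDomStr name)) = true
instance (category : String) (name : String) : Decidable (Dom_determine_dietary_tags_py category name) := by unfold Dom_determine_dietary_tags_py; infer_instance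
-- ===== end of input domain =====

-- B replaces A's chain of category if-statements with one static rule table and a rule loop (objective: simpler).

-- ===== PORT A =====
def determine_dietary_tags_py (category : String) (name : String) : List String :=
  let tags : List String := []
  let name_lower := PySem.Str.lower name
  let tags :=
    if category == "proteinas" then
      if ["carne", "boi", "porco", "frango", "peixe"].any
          (fun w => PySem.Str.isIn w name_lower) then tags ++ ["meat"] else tags
    else tags
  let tags := if category == "laticinios" then tags ++ ["dairy", "lactose"] else tags
  let tags :=
    if ["frutas", "vegetais", "cereais", "leguminosas", "oleaginosas"].any
        (fun c => c == category) then (tags ++ ["vegetarian"]) ++ ["vegan"] else tags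
  let tags :=
    if category == "cereais" then
      if ["trigo", "aveia", "cevada", "centeio"].any
          (fun w => PySem.Str.isIn w name_lower) then tags ++ ["gluten"] else tags
    else tags
  tags

-- ===== PORT B =====
def pvTagRules : PySem.Dict String (List String × List (List String × String)) :=
  PySem.Dict.ofList
    [ ("proteinas", ([], [(["carne", "boi", "porco", "frango", "peixe"], "meat")])),
      ("laticinios", (["dairy", "lactose"], [])),
      ("frutas", (["vegetarian", "vegan"], [])),
      ("vegetais", (["vegetarian", "vegan"], [])),
      ("cereais", (["vegetarian", "vegan"],
                   [(["trigo", "aveia", "cevada", "centeio"], "gluten")])),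
      ("leguminosas", (["vegetarian", "vegan"], [])),
      ("oleaginosas", (["vegetarian", "vegan"], [])) ]

def determine_dietary_tags_py_alt (category : String) (name : String) : List String :=
  let entry := (pvTagRules.get? category).getD ([], [])
  let name_lower := PySem.Str.lower name
  entry.1 ++
    (entry.2.filter (fun r => r.1.any (fun w => PySem.Str.isIn w name_lower))).map
      (fun r => r.2)

-- ===== PRECONDITION & SPEC =====
def Spec_determine_dietary_tags_py (category : String) (name : String) (out : List String) : Prop := out = determine_dietary_tags_py_alt category name
instance (category : String) (name : String) (out : List String) : Decidable (Spec_determine_dietary_tags_py category name out) := by unfold Spec_determine_dietary_tags_py; infer_instance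

-- ===== CLAIM (what is proved, stated in full; the proofs are below) =====
def Claim_equal_determine_dietary_tags_py : Prop := ∀ (category : String) (name : String), Dom_determine_dietary_tags_py category name → Spec_determine_dietary_tags_py category name (determine_dietary_tags_py category name)

-- ===== LEMMAS AND PROOFS =====

-- ===== VERDICT (by name: the statement is the Claim_ definition above) =====
theorem determine_dietary_tags_py_spec : Claim_equal_determine_dietary_tags_py := by
  intro category name _
  show determine_dietary_tags_py category name = determine_dietary_tags_py_alt category name
  by_cases h1 : category = "proteinas"
  · subst h1
    have e : pvTagRules.get? "proteinas" = some (([] : List String), [((["carne","boi","porco","frango","peixe"] : List String), "meat")]) := rfl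
    simp [determine_dietary_tags_py, determine_dietary_tags_py_alt, e]
    split <;> simp_all
  by_cases h2 : category = "laticinios"
  · subst h2
    have e : pvTagRules.get? "laticinios" = some ((["dairy","lactose"] : List String), ([] : List (List String × String))) := rfl
    simp [determine_dietary_tags_py, determine_dietary_tags_py_alt, e]
  by_cases h3 : category = "frutas"
  · subst h3
    have e : pvTagRules.get? "frutas" = some ((["vegetarian","vegan"] : List String), ([] : List (List String × String))) := rfl
    simp [determine_dietary_tags_py, determine_dietary_tags_py_alt, e]
  by_cases h4 : category = "vegetais"
  · subst h4
    have e : pvTagRules.get? "vegetais" = some ((["vegetarian","vegan"] : List String), ([] : List (List String × String))) := rfl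
    simp [determine_dietary_tags_py, determine_dietary_tags_py_alt, e]
  by_cases h5 : category = "cereais"
  · subst h5
    have e : pvTagRules.get? "cereais" = some ((["vegetarian","vegan"] : List String), [((["trigo","aveia","cevada","centeio"] : List String), "gluten")]) := rfl
    simp [determine_dietary_tags_py, determine_dietary_tags_py_alt, e]
    split <;> simp_all
  by_cases h6 : category = "leguminosas"
  · subst h6
    have e : pvTagRules.get? "leguminosas" = some ((["vegetarian","vegan"] : List String), ([] : List (List String × String))) := rfl
    simp [determine_dietary_tags_py, determine_dietary_tags_py_alt, e]
  by_cases h7 : category = "oleaginosas"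
  · subst h7
    have e : pvTagRules.get? "oleaginosas" = some ((["vegetarian","vegan"] : List String), ([] : List (List String × String))) := rfl
    simp [determine_dietary_tags_py, determine_dietary_tags_py_alt, e]
  · have e : pvTagRules.get? category = none := by
      rw [PySem.Dict.get?_eq_none_iff_not_mem_keys]
      have hk : pvTagRules.keys = ["proteinas", "laticinios", "frutas", "vegetais", "cereais", "leguminosas", "oleaginosas"] := rfl
      simp [hk, h1, h2, h3, h4, h5, h6, h7]
    have g3 : ¬"frutas" = category := fun h => h3 h.symm
    have g4 : ¬"vegetais" = category := fun h => h4 h.symm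
    have g5 : ¬"cereais" = category := fun h => h5 h.symm
    have g6 : ¬"leguminosas" = category := fun h => h6 h.symm
    have g7 : ¬"oleaginosas" = category := fun h => h7 h.symm
    simp [determine_dietary_tags_py, determine_dietary_tags_py_alt, e, h1, h2, g3, g4, g5, g6, g7]
    exact fun h => absurd h h5
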